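-- pv_equiv track=rewrite | github.com/larsbonde/masters | modules/dataset_utils.py | join_partitions
-- ===== SOURCE A (Python) =====
-- def join_partitions(partitions):
--     n_split = len(partitions)
--     train_partitions = [list() for _ in range(n_split)]
--     test_partitions = [list() for _ in range(n_split)]
--
--     for i in range(len(partitions)):
--         test_partitions[i] = partitions[i]
--         for j in range(len(partitions)):
--             if j != i:
--                 train_partitions[i].extend(partitions[j])
--     return train_partitions, test_partitions
-- ===== SOURCE B (Python) =====
-- def join_partitions(partitions):
--     n = len(partitions)
--     # prefix[i] = flattened partitions[0..i-1], built in one forward pass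
--     prefixes = []
--     acc = []
--     for p in partitions:
--         prefixes.append(acc)
--         acc = acc + p
--     # suffix[i] = flattened partitions[i+1..n-1], built in one backward pass
--     suffixes_rev = []
--     acc = []
--     for p in reversed(partitions):
--         suffixes_rev.append(acc)
--         acc = p + acc
--     suffixes = list(reversed(suffixes_rev))
--     train_partitions = [pre + suf for pre, suf in zip(prefixes, suffixes)]
--     test_partitions = list(partitions)
--     return train_partitions, test_partitions
-- ===== Notes on version B (the rewrite author's own statement) =====
-- stated objective: alternative
-- what changed: Replaces the nested rescan (for each i, re-extend over every j != i) by prefix/suffix cumulative-concatenation tables built in one forward and one backward pass, then combines train[i] = prefix[i] + suffix[i]; same asymptotic cost, different decomposition.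
import Mathlib
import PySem

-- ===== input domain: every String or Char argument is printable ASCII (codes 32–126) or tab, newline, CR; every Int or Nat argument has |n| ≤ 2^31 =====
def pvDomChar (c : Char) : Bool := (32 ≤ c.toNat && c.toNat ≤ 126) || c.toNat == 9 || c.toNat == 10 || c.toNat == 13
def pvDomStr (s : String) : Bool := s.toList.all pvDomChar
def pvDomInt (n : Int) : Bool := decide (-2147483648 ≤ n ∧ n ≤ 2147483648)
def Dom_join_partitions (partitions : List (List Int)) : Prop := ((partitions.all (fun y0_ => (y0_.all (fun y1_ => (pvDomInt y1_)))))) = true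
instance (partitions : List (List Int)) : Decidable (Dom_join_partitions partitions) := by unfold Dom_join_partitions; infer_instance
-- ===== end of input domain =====

-- B builds prefix/suffix cumulative-concatenation tables in one forward and one backward pass
-- and combines train[i] = prefix[i] + suffix[i], instead of A's nested rescan; same cost class.

-- ===== PORT A =====
-- literal transliteration: n_split, two lists of empty lists, outer loop sets test[i] and
-- the inner loop over j extends train[i] by partitions[j] when j ≠ i.
def join_partitions (partitions : List (List Int)) : List (List Int) × List (List Int) :=
  let n := partitions.length
  let train0 := List.replicate n ([] : List Int)
  let test0 := List.replicate n ([] : List Int)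
  (List.range partitions.length).foldl
    (fun (st : List (List Int) × List (List Int)) i =>
      let te := st.2.set i (partitions.getD i [])
      let tr := (List.range partitions.length).foldl
        (fun tr j =>
          if j ≠ i then tr.set i ((tr.getD i []) ++ partitions.getD j []) else tr) st.1
      (tr, te))
    (train0, test0)

-- ===== PORT B =====
-- forward pass: prefixes[i] = concatenation of partitions[0..i-1]
def altPrefixes : List (List Int) → List Int → List (List Int)
  | [], _ => []
  | p :: rest, acc => acc :: altPrefixes rest (acc ++ p)

-- backward pass over the reversed list: suffixes (in reverse order)
def altSuffixRev : List (List Int) → List Int → List (List Int)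
  | [], _ => []
  | p :: rest, acc => acc :: altSuffixRev rest (p ++ acc)

def join_partitions_alt (partitions : List (List Int)) : List (List Int) × List (List Int) :=
  let prefixes := altPrefixes partitions []
  let suffixes := (altSuffixRev partitions.reverse []).reverse
  ((prefixes.zip suffixes).map (fun pr => pr.1 ++ pr.2), partitions)

-- ===== PRECONDITION & SPEC =====
def Spec_join_partitions (partitions : List (List Int)) (out : List (List Int) × List (List Int)) : Prop := out = join_partitions_alt partitions
instance (partitions : List (List Int)) (out : List (List Int) × List (List Int)) : Decidable (Spec_join_partitions partitions out) := by unfold Spec_join_partitions; infer_instance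

-- ===== CLAIM (what is proved, stated in full; the proofs are below) =====
def Claim_equal_join_partitions : Prop := ∀ (partitions : List (List Int)), Dom_join_partitions partitions → Spec_join_partitions partitions (join_partitions partitions)

-- ===== LEMMAS AND PROOFS =====

lemma setGetD_self {α : Type} (tr : List α) (k : ℕ) (x d : α) (h : k < tr.length) :
    ((tr.set k x)[k]?).getD d = x := by
  rw [List.getElem?_set_self h]
  rfl

lemma setGetD_ne {α : Type} (tr : List α) (j k : ℕ) (x d : α) (h : j ≠ k) :
    ((tr.set j x)[k]?).getD d = (tr[k]?).getD d := by
  rw [List.getElem?_set_ne h]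

-- the value A's inner loop appends at index i: all partitions except the i-th, in order
def aStuff (ps : List (List Int)) (i : ℕ) : List Int :=
  ((List.range ps.length).filter (· ≠ i)).flatMap (fun j => ps.getD j [])

lemma innerLoop_eq (ps : List (List Int)) (i : ℕ) (l : List ℕ) (tr : List (List Int)) :
    l.foldl (fun tr j =>
        if j ≠ i then tr.set i ((tr.getD i []) ++ ps.getD j []) else tr) tr
      = tr.set i ((tr.getD i []) ++ (l.filter (· ≠ i)).flatMap (fun j => ps.getD j [])) := by
  induction l generalizing tr with
  | nil =>
    simp only [List.foldl_nil, List.filter_nil, List.flatMap_nil, List.append_nil]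
    by_cases h : i < tr.length
    · rw [List.getD_eq_getElem _ _ (by simpa using h), List.set_getElem_self]
    · rw [List.set_eq_of_length_le (by omega)]
  | cons j rest ih =>
    simp only [List.foldl_cons]
    by_cases hj : j ≠ i
    · rw [List.filter_cons_of_pos (by simpa using hj), List.flatMap_cons, if_pos hj, ih,
        List.set_set]
      by_cases h : i < tr.length
      · have hx : (tr.set i ((tr.getD i []) ++ ps.getD j [])).getD i []
            = (tr.getD i []) ++ ps.getD j [] := by
          rw [List.getD_eq_getElem?_getD]
          exact setGetD_self _ _ _ _ h
        rw [hx, List.append_assoc]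
      · rw [List.set_eq_of_length_le (by omega), List.set_eq_of_length_le (by omega)]
    · rw [List.filter_cons_of_neg (by simpa using hj), if_neg hj, ih]

-- a fold of pure writes: the value finally at k
lemma foldSet_getD {α : Type} (d : α) (g : ℕ → α) (l : List ℕ) (tr : List α) (k : ℕ)
    (hk : k < tr.length) :
    ((l.foldl (fun tr i => tr.set i (g i)) tr).getD k d)
      = if k ∈ l then g k else tr.getD k d := by
  induction l generalizing tr with
  | nil => simp
  | cons j rest ih =>
    simp only [List.foldl_cons, List.mem_cons]
    rw [ih _ (by simpa using hk)]
    by_cases hkr : k ∈ rest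
    · simp [hkr]
    · by_cases hkj : k = j
      · subst hkj
        simp [hkr, List.getD_eq_getElem?_getD, setGetD_self _ _ _ _ hk]
      · simp [hkr, hkj, List.getD_eq_getElem?_getD, setGetD_ne _ _ _ _ _ (fun h => hkj h.symm)]

-- a fold of append-writes at distinct indices: the value finally at k
lemma foldAppendSet_getD (s : ℕ → List Int) (l : List ℕ) (hnd : l.Nodup)
    (tr : List (List Int)) (k : ℕ) (hk : k < tr.length) :
    ((l.foldl (fun tr i => tr.set i ((tr.getD i []) ++ s i)) tr).getD k [])
      = if k ∈ l then (tr.getD k []) ++ s k else tr.getD k [] := by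
  induction l generalizing tr with
  | nil => simp
  | cons j rest ih =>
    obtain ⟨hjr, hrest⟩ := List.nodup_cons.mp hnd
    simp only [List.foldl_cons, List.mem_cons]
    rw [ih hrest _ (by simpa using hk)]
    by_cases hkj : k = j
    · subst hkj
      have hkr : k ∉ rest := hjr
      simp [hkr, List.getD_eq_getElem?_getD, setGetD_self _ _ _ _ hk]
    · have hne : (tr.set j ((tr.getD j []) ++ s j)).getD k [] = tr.getD k [] := by
        rw [List.getD_eq_getElem?_getD, List.getD_eq_getElem?_getD]
        exact setGetD_ne _ _ _ _ _ (fun h => hkj h.symm)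
      by_cases hkr : k ∈ rest
      · simp [hkr, List.getD_eq_getElem?_getD] at hne ⊢
        simp [hne]
      · simp [hkr, hkj, List.getD_eq_getElem?_getD] at hne ⊢
        simp [hne]

lemma foldl_set_length {α : Type} (h : List α → ℕ → α) (l : List ℕ) (tr : List α) :
    (l.foldl (fun tr i => tr.set i (h tr i)) tr).length = tr.length := by
  induction l generalizing tr with
  | nil => rfl
  | cons j rest ih => simp [List.foldl_cons, ih]

-- A's outer fold splits into two independent folds
lemma foldl_pair {α β γ : Type} (f : α → γ → α) (g : β → γ → β) (l : List γ) (a : α) (b : β) :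
    l.foldl (fun (st : α × β) c => (f st.1 c, g st.2 c)) (a, b) = (l.foldl f a, l.foldl g b) := by
  induction l generalizing a b with
  | nil => rfl
  | cons c rest ih => simp [List.foldl_cons, ih]

lemma join_partitions_eq (ps : List (List Int)) :
    join_partitions ps =
      ((List.range ps.length).foldl
          (fun tr i => tr.set i ((tr.getD i []) ++ aStuff ps i))
          (List.replicate ps.length ([] : List Int)),
       (List.range ps.length).foldl (fun te i => te.set i (ps.getD i []))
          (List.replicate ps.length ([] : List Int))) := by
  unfold join_partitions
  have hstep := foldl_pair
    (fun (tr : List (List Int)) i => (List.range ps.length).foldl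
        (fun tr j => if j ≠ i then tr.set i ((tr.getD i []) ++ ps.getD j []) else tr) tr)
    (fun (te : List (List Int)) i => te.set i (ps.getD i []))
    (List.range ps.length)
    (List.replicate ps.length ([] : List Int))
    (List.replicate ps.length ([] : List Int))
  refine Eq.trans hstep ?_
  congr 1
  apply List.foldl_ext
  intro tr i _
  exact innerLoop_eq ps i _ tr

lemma range_flatMap_getD_take (ps : List (List Int)) (k : ℕ) (hk : k ≤ ps.length) :
    (List.range k).flatMap (fun j => ps.getD j []) = (ps.take k).flatten := by
  induction k with
  | zero => simp
  | succ m ih =>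
    rw [List.range_succ, List.flatMap_append, ih (by omega)]
    have hm : m < ps.length := by omega
    have ht : ps.take (m + 1) = ps.take m ++ [ps[m]] := by
      rw [List.take_add_one, List.getElem?_eq_getElem hm]
      rfl
    rw [ht, List.flatten_append]
    simp [List.getD_eq_getElem?_getD, List.getElem?_eq_getElem hm]

lemma range'_flatMap_getD_drop (ps : List (List Int)) (a m : ℕ) (hm : a + m = ps.length) :
    (List.range' a m).flatMap (fun j => ps.getD j []) = (ps.drop a).flatten := by
  induction m generalizing a with
  | zero =>
    have : ps.drop a = [] := List.drop_eq_nil_of_le (by omega)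
    simp [this]
  | succ mm ih =>
    have ha : a < ps.length := by omega
    rw [List.range'_succ, List.flatMap_cons, ih (a + 1) (by omega)]
    conv_rhs => rw [List.drop_eq_getElem_cons ha]
    rw [List.flatten_cons]
    simp [List.getD_eq_getElem?_getD, List.getElem?_eq_getElem ha]

lemma aStuff_eq (ps : List (List Int)) (k : ℕ) (hk : k < ps.length) :
    aStuff ps k = (ps.take k).flatten ++ (ps.drop (k + 1)).flatten := by
  unfold aStuff
  have hsplit : List.range ps.length
      = List.range (k + 1) ++ List.range' (k + 1) (ps.length - (k + 1)) := by
    have h0 : List.range' 0 (k + 1) ++ List.range' (0 + (k + 1)) (ps.length - (k + 1))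
        = List.range' 0 ((k + 1) + (ps.length - (k + 1))) := List.range'_append_1
    rw [Nat.zero_add, show (k + 1) + (ps.length - (k + 1)) = ps.length from by omega] at h0
    rw [List.range_eq_range', ← h0, ← List.range_eq_range']
  rw [hsplit, List.filter_append, List.range_succ, List.filter_append]
  have h1 : (List.range k).filter (· ≠ k) = List.range k := by
    rw [List.filter_eq_self]
    intro a ha
    simp at ha ⊢
    omega
  have h2 : ([k].filter (· ≠ k)) = ([] : List ℕ) := by simp
  have h3 : (List.range' (k + 1) (ps.length - (k + 1))).filter (· ≠ k)
      = List.range' (k + 1) (ps.length - (k + 1)) := by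
    rw [List.filter_eq_self]
    intro a ha
    simp [List.mem_range'_1] at ha ⊢
    omega
  rw [h1, h2, h3, List.append_nil, List.flatMap_append,
    range_flatMap_getD_take ps k (by omega),
    range'_flatMap_getD_drop ps (k + 1) (ps.length - (k + 1)) (by omega)]

lemma altPrefixes_eq (ps : List (List Int)) (acc : List Int) :
    altPrefixes ps acc = (List.range ps.length).map (fun i => acc ++ (ps.take i).flatten) := by
  induction ps generalizing acc with
  | nil => rfl
  | cons p rest ih =>
    simp only [altPrefixes, List.length_cons, List.range_succ_eq_map, List.map_cons,
      List.map_map, ih]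
    simp [Function.comp, List.take_succ_cons, List.append_assoc]

lemma altSuffixRev_eq (l : List (List Int)) (acc : List Int) :
    altSuffixRev l acc
      = (List.range l.length).map (fun i => ((l.take i).reverse).flatten ++ acc) := by
  induction l generalizing acc with
  | nil => rfl
  | cons p rest ih =>
    simp only [altSuffixRev, List.length_cons, List.range_succ_eq_map, List.map_cons,
      List.map_map, ih]
    simp [Function.comp, List.take_succ_cons, List.append_assoc]

lemma alt_train_eq (ps : List (List Int)) :
    (join_partitions_alt ps).1
      = (List.range ps.length).map
          (fun k => (ps.take k).flatten ++ (ps.drop (k + 1)).flatten) := by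
  unfold join_partitions_alt
  simp only [altPrefixes_eq, altSuffixRev_eq, List.length_reverse]
  apply List.ext_getElem
  · simp
  · intro k hk1 hk2
    simp only [List.length_map, List.length_range] at hk2
    have hk : k < ps.length := by
      simp at hk1
      omega
    rw [List.getElem_map, List.getElem_zip, List.getElem_map, List.getElem_range,
      List.getElem_reverse, List.getElem_map, List.getElem_range]
    simp only [List.length_map, List.length_range, List.append_nil]
    have htr : (ps.reverse.take (ps.length - 1 - k)).reverse = ps.drop (k + 1) := by
      rw [List.take_reverse, List.reverse_reverse]
      congr 1
      omega
    rw [htr, List.getElem_map, List.getElem_range]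
    simp

lemma a_train_eq (ps : List (List Int)) :
    (List.range ps.length).foldl
        (fun tr i => tr.set i ((tr.getD i []) ++ aStuff ps i))
        (List.replicate ps.length ([] : List Int))
      = (List.range ps.length).map
          (fun k => (ps.take k).flatten ++ (ps.drop (k + 1)).flatten) := by
  have hTlen : ((List.range ps.length).foldl
      (fun tr i => tr.set i ((tr.getD i []) ++ aStuff ps i))
      (List.replicate ps.length ([] : List Int))).length = ps.length :=
    (foldl_set_length _ _ _).trans (by simp)
  apply List.ext_getElem
  · rw [hTlen]
    simp
  · intro k hk1 hk2
    have hk : k < ps.length := by rw [hTlen] at hk1; exact hk1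
    rw [← List.getD_eq_getElem _ ([] : List Int) hk1,
      foldAppendSet_getD (aStuff ps) _ List.nodup_range _ k (by simpa using hk),
      List.getElem_map, List.getElem_range]
    simp [List.mem_range, hk, aStuff_eq ps k hk]

lemma a_test_eq (ps : List (List Int)) :
    (List.range ps.length).foldl (fun te i => te.set i (ps.getD i []))
        (List.replicate ps.length ([] : List Int))
      = ps := by
  have hTlen : ((List.range ps.length).foldl (fun te i => te.set i (ps.getD i []))
      (List.replicate ps.length ([] : List Int))).length = ps.length :=
    (foldl_set_length _ _ _).trans (by simp)
  apply List.ext_getElem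
  · rw [hTlen]
  · intro k hk1 hk2
    rw [← List.getD_eq_getElem _ ([] : List Int) hk1,
      foldSet_getD ([] : List Int) _ _ _ k (by simpa using hk2)]
    simp [List.mem_range, hk2]

theorem join_partitions_spec : Claim_equal_join_partitions := by
  intro ps _
  unfold Spec_join_partitions
  rw [join_partitions_eq, a_train_eq, a_test_eq, ← alt_train_eq]
  exact Prod.ext rfl rfl
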